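-- pv_equiv track=rewrite | github.com/Dorin130/Projeto-IA | SameGame.py | board_remove_group
-- ===== SOURCE A (Python) =====
-- def pos_l (pos):
-- 	return pos[0]
--
-- def pos_c (pos):
-- 	return pos[1]
--
-- def board_remove_group(board, group):
-- 	"""remove  o  grupo  do  tabuleiro fazendo
-- 	a  compactação  vertical  e  horizontal  das  peças."""
-- 	new_board = [list(x) for x in board] #copy the board
-- 	for pos in group:
-- 		board_del_color(new_board, pos)
--
-- 	new_board = list(map(list, zip(*new_board))) #this transposes the matrix
-- 	for row in new_board:
-- 		row.sort(key=lambda x: x != 0) #this pushes all zeroes to left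
--
-- 	new_board.sort(key=lambda x: x.count(0) == board_height(board))
--
-- 	new_board = list(map(list, zip(*new_board)))
-- 	return new_board
--
-- def board_height(board):
-- 	return len(board)
--
-- def board_del_color(board, pos):
-- 	board[pos_l(pos)][pos_c(pos)] = 0
-- ===== SOURCE B (Python) =====
-- def board_remove_group(board, group):
--     """Remove the group, apply gravity within each column, and shift empty
--     columns to the right, building the result column by column."""
--     grid = [list(row) for row in board]
--     for l, c in group:
--         grid[l][c] = 0
--     H = len(grid)
--     W = len(grid[0]) if H else 0
--     full_cols, empty_cols = [], []
--     for c in range(W):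
--         kept = [grid[r][c] for r in range(H) if grid[r][c] != 0]
--         col = [0] * (H - len(kept)) + kept
--         (full_cols if kept else empty_cols).append(col)
--     cols = full_cols + empty_cols
--     return [[col[r] for col in cols] for r in range(H)]
-- ===== Notes on version B (the rewrite author's own statement) =====
-- stated objective: alternative
-- what changed: Replaces A's two zip-transposes, per-column zeros-left stable sort and column-level binary-key stable sort by a direct column-by-column compaction: collect each column's surviving non-zero cells top-down, pad with zeros, and stably partition columns into non-empty/empty; Pre_ excludes boards with a row shorter than the first row and non-empty boards whose first row is empty, where A's zip(*...) transpose silently truncates or collapses the board (an artefact of zip), and positions outside Python's index range, where A raises IndexError.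
-- outside the precondition, e.g. on board_remove_group([[1, 2], [3]], []): A returns [[1], [3]], B raises IndexError; on board_remove_group([[], []], []): A returns [], B returns [[], []]
import Mathlib
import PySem

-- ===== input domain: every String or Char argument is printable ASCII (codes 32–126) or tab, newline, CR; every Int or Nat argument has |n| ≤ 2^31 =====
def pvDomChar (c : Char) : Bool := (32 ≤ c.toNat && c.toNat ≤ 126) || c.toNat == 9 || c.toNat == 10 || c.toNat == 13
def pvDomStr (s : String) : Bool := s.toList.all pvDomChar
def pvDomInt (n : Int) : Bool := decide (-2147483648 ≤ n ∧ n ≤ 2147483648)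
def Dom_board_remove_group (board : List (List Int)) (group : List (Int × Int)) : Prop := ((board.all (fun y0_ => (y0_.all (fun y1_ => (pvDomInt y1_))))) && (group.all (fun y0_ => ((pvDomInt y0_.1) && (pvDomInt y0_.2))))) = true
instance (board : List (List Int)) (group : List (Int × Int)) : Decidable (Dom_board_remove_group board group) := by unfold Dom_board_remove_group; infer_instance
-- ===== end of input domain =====

-- B removes the group and compacts column by column (no transposes, no sorts); equal return values on Pre_.

-- ===== PORT A =====
def pos_l (pos : Int × Int) : Int := pos.1
def pos_c (pos : Int × Int) : Int := pos.2

def board_height (board : List (List Int)) : Int := board.length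

-- row[c] = 0 with Python's negative-index wrap; an out-of-range index is an IndexError in Python
-- (excluded by Pre_), here the row is returned unchanged.
def rowSetZero (row : List Int) (c : Int) : List Int :=
  let j := if c < 0 then c + row.length else c
  if 0 ≤ j ∧ j < (row.length : Int) then row.set j.toNat 0 else row

def board_del_color (board : List (List Int)) (pos : Int × Int) : List (List Int) :=
  let i := if pos_l pos < 0 then pos_l pos + board.length else pos_l pos
  if 0 ≤ i ∧ i < (board.length : Int) then
    board.modify i.toNat (fun row => rowSetZero row (pos_c pos))
  else board

lemma pvSumTailLe (m : List (List Int)) :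
    ((m.map (fun r => r.tail)).map List.length).sum ≤ (m.map List.length).sum := by
  induction m with
  | nil => simp
  | cons r t ih =>
    simp only [List.map_cons, List.sum_cons]
    have := r.length_tail
    omega

lemma pvSumTailLt (m : List (List Int)) (h1 : m ≠ []) (h2 : ∀ r ∈ m, r ≠ []) :
    ((m.map (fun r => r.tail)).map List.length).sum < (m.map List.length).sum := by
  match m with
  | r :: t =>
    simp only [List.map_cons, List.sum_cons]
    have h3 : r ≠ [] := h2 r (by simp)
    have h4 : r.tail.length < r.length := by
      cases r with
      | nil => simp at h3
      | cons a s => simp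
    have := pvSumTailLe t
    omega

-- zip(*m) for a list of int-lists: rows become columns, truncated at the shortest row.
def pyZipT (m : List (List Int)) : List (List Int) :=
  if h : m ≠ [] ∧ ∀ r ∈ m, r ≠ [] then
    m.map (fun r => r.headD 0) :: pyZipT (m.map (fun r => r.tail))
  else []
termination_by (m.map List.length).sum
decreasing_by simpa using pvSumTailLt m h.1 h.2

def board_remove_group (board : List (List Int)) (group : List (Int × Int)) : List (List Int) :=
  let new_board := board.map (fun x => x)
  let new_board := group.foldl (fun b pos => board_del_color b pos) new_board
  let new_board := pyZipT new_board
  let new_board := new_board.map (fun row => PySem.List.sorted row (fun x => x != 0) false)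
  let new_board := PySem.List.sorted new_board
      (fun x => decide ((PySem.List.count x 0 : Int) = board_height board)) false
  pyZipT new_board

-- ===== PORT B =====
-- grid[l][c] = 0 with Python's index semantics (negative wrap; out of range raises, excluded by Pre_)
def gridSetZero (grid : List (List Int)) (l c : Int) : List (List Int) :=
  let i := if l < 0 then l + grid.length else l
  if 0 ≤ i ∧ i < (grid.length : Int) then
    grid.modify i.toNat (fun row =>
      let j := if c < 0 then c + row.length else c
      if 0 ≤ j ∧ j < (row.length : Int) then row.set j.toNat 0 else row)
  else grid

def board_remove_group_alt (board : List (List Int)) (group : List (Int × Int)) : List (List Int) :=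
  let grid := board.map (fun row => row.map (fun v => v))
  let grid := group.foldl (fun g p => gridSetZero g p.1 p.2) grid
  let H : Nat := grid.length
  let W : Nat := (grid.headD []).length
  let pack := (List.range W).foldl (fun (acc : List (List Int) × List (List Int)) c =>
      let kept := ((List.range H).filter (fun r =>
          decide ((grid.getD r []).getD c 0 ≠ 0))).map (fun r => (grid.getD r []).getD c 0)
      let col := List.replicate (H - kept.length) 0 ++ kept
      if kept.isEmpty then (acc.1, acc.2 ++ [col]) else (acc.1 ++ [col], acc.2))
    ([], [])
  (List.range H).map (fun r => (pack.1 ++ pack.2).map (fun col => col.getD r 0))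

-- ===== PRECONDITION & SPEC =====
-- Pre_ excludes (a) group positions outside Python's index range, on which A raises IndexError
-- (B raises there too), (b) boards with a row shorter than the first row, on which A's
-- zip(*...)-based transpose silently truncates the board (an artefact of zip; B raises
-- IndexError on them), and (c) non-empty boards whose first row is empty, on which the same
-- zip collapses the board to [] (B keeps the rows).
def Pre_board_remove_group (board : List (List Int)) (group : List (Int × Int)) : Prop :=
  (∀ row ∈ board, (board.headD []).length ≤ row.length) ∧
  (board ≠ [] → (board.headD []).length ≠ 0) ∧
  (∀ p ∈ group, -(board.length : Int) ≤ p.1 ∧ p.1 < (board.length : Int) ∧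
     -((board.headD []).length : Int) ≤ p.2 ∧ p.2 < ((board.headD []).length : Int))
instance (board : List (List Int)) (group : List (Int × Int)) : Decidable (Pre_board_remove_group board group) := by unfold Pre_board_remove_group; infer_instance

def pvWitness_board_remove_group : List (List Int) × (List (Int × Int)) :=
  ([[1, 0], [2, 2]], [(0, 0), (-1, 1)])

def Spec_board_remove_group (board : List (List Int)) (group : List (Int × Int)) (out : List (List Int)) : Prop := out = board_remove_group_alt board group
instance (board : List (List Int)) (group : List (Int × Int)) (out : List (List Int)) : Decidable (Spec_board_remove_group board group out) := by unfold Spec_board_remove_group; infer_instance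

-- ===== CLAIM (what is proved, stated in full; the proofs are below) =====
def Claim_equal_board_remove_group : Prop := ∀ (board : List (List Int)) (group : List (Int × Int)), Dom_board_remove_group board group → Pre_board_remove_group board group → Spec_board_remove_group board group (board_remove_group board group)

-- ===== LEMMAS AND PROOFS =====

lemma pvSetZeroEq (g : List (List Int)) (p : Int × Int) :
    gridSetZero g p.1 p.2 = board_del_color g p := rfl

lemma pvRowSetZero_length (row : List Int) (c : Int) :
    (rowSetZero row c).length = row.length := by
  unfold rowSetZero
  simp only []
  split <;> split
  · exact List.length_set
  · rfl
  · exact List.length_set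
  · rfl

lemma pvDel_length (b : List (List Int)) (p : Int × Int) :
    (board_del_color b p).length = b.length := by
  unfold board_del_color
  simp only []
  split <;> split
  · exact List.length_modify _ _ _
  · rfl
  · exact List.length_modify _ _ _
  · rfl

lemma pvModMapLen (b : List (List Int)) (n : Nat) (c : Int) :
    (b.modify n (fun row => rowSetZero row c)).map List.length = b.map List.length := by
  apply List.ext_getElem?
  intro k
  simp only [List.getElem?_map, List.getElem?_modify]
  cases hb : b[k]? with
  | none => rfl
  | some r =>
    simp only [Option.map_eq_map, Option.map_some]
    congr 1
    split
    · exact pvRowSetZero_length r c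
    · rfl

lemma pvDel_mapLen (b : List (List Int)) (p : Int × Int) :
    (board_del_color b p).map List.length = b.map List.length := by
  unfold board_del_color
  simp only []
  split <;> split
  · exact pvModMapLen _ _ _
  · rfl
  · exact pvModMapLen _ _ _
  · rfl

lemma pvFoldDel_nil (gs : List (Int × Int)) :
    gs.foldl (fun b pos => board_del_color b pos) [] = [] := by
  induction gs with
  | nil => rfl
  | cons p t ih =>
    have h : board_del_color [] p = [] := by
      unfold board_del_color
      simp only [List.length_nil, Nat.cast_zero]
      rw [if_neg (fun hcon => absurd (lt_of_le_of_lt hcon.1 hcon.2) (lt_irrefl 0))]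
    simp [h, ih]

lemma pvFoldDel_length (gs : List (Int × Int)) :
    ∀ (b : List (List Int)),
    (gs.foldl (fun b pos => board_del_color b pos) b).length = b.length := by
  induction gs with
  | nil => intro b; rfl
  | cons p t ih =>
    intro b
    simp only [List.foldl_cons]
    rw [ih (board_del_color b p), pvDel_length]

lemma pvFoldDel_mapLen (gs : List (Int × Int)) :
    ∀ (b : List (List Int)),
    (gs.foldl (fun b pos => board_del_color b pos) b).map List.length = b.map List.length := by
  induction gs with
  | nil => intro b; rfl
  | cons p t ih =>
    intro b
    simp only [List.foldl_cons]
    rw [ih (board_del_color b p), pvDel_mapLen]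

-- transpose characterization: W = the minimal row length, witnessed by one row of length W
lemma pvZipT_spec (W : Nat) : ∀ (b : List (List Int)), b ≠ [] →
    (∀ row ∈ b, W ≤ row.length) → (∃ row ∈ b, row.length = W) →
    pyZipT b = (List.range W).map (fun c => b.map (fun row => row.getD c 0)) := by
  induction W with
  | zero =>
    intro b hb hge hex
    rw [pyZipT, dif_neg, List.range_zero, List.map_nil]
    rintro ⟨-, hall⟩
    obtain ⟨r0, hr0, hlen0⟩ := hex
    exact (hall r0 hr0) (List.length_eq_zero_iff.1 hlen0)
  | succ w ih =>
    intro b hb hge hex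
    rw [pyZipT, dif_pos ?_]
    · have h1 : b.map (fun r => r.tail) ≠ [] := by simpa using hb
      have h2 : ∀ row ∈ b.map (fun r => r.tail), w ≤ row.length := by
        intro row hrow
        rcases List.mem_map.1 hrow with ⟨r, hrmem, rfl⟩
        have := hge r hrmem
        simp only [List.length_tail]
        omega
      have h3 : ∃ row ∈ b.map (fun r => r.tail), row.length = w := by
        obtain ⟨r0, hr0, hl⟩ := hex
        exact ⟨r0.tail, List.mem_map.2 ⟨r0, hr0, rfl⟩, by simp [List.length_tail, hl]⟩
      rw [ih _ h1 h2 h3, List.range_succ_eq_map]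
      simp only [List.map_cons, List.map_map]
      congr 1
      · apply List.map_congr_left
        intro row hrow
        have := hge row hrow
        cases row with
        | nil => simp at this
        | cons a s => rfl
      · apply List.map_congr_left
        intro c _
        simp only [Function.comp, Nat.succ_eq_add_one]
        apply List.map_congr_left
        intro row _
        simp [List.getD_eq_getElem?_getD, List.getElem?_tail]
    · refine ⟨hb, fun r hrmem => ?_⟩
      have := hge r hrmem
      intro hnil
      rw [hnil] at this
      simp at this

lemma pvMapEqRange {α β : Type} (f : α → β) (d : α) :
    ∀ (l : List α), l.map f = (List.range l.length).map (fun i => f (l.getD i d)) := by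
  intro l
  induction l with
  | nil => simp
  | cons x t ih =>
    rw [List.length_cons, List.range_succ_eq_map, List.map_cons, List.map_cons]
    congr 1
    rw [ih, List.map_map]
    apply List.map_congr_left
    intro i _
    simp [Function.comp]

-- a stable sort on a Bool key is the stable partition (falses first)
lemma pvInsertBy_mid {α : Type} (before : α → α → Bool) (x : α) (A0 A1 : List α)
    (h0 : ∀ y ∈ A0, before x y = false) (h1 : ∀ y ∈ A1, before x y = true) :
    PySem.List.insertBy before x (A0 ++ A1) = A0 ++ x :: A1 := by
  induction A0 with
  | nil =>
    cases A1 with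
    | nil => rfl
    | cons z t => simp [PySem.List.insertBy, h1 z (by simp)]
  | cons y t ih =>
    have hy : before x y = false := h0 y (by simp)
    simp only [List.cons_append, PySem.List.insertBy, hy, Bool.false_eq_true, if_false]
    rw [ih (fun z hz => h0 z (by simp [hz]))]

lemma pvFoldInsertPartition {α : Type} (p : α → Bool) :
    ∀ (xs A0 A1 : List α), (∀ y ∈ A0, p y = false) → (∀ y ∈ A1, p y = true) →
    xs.foldl (fun acc x => PySem.List.insertBy (fun a b => decide (p a < p b)) x acc) (A0 ++ A1)
      = (A0 ++ xs.filter (fun x => !p x)) ++ (A1 ++ xs.filter p) := by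
  intro xs
  induction xs with
  | nil => intro A0 A1 _ _; simp
  | cons x t ih =>
    intro A0 A1 h0 h1
    simp only [List.foldl_cons]
    by_cases hpx : p x = true
    · rw [PySem.List.insertBy_of_forall_not_before _ _ _ (by
        intro y hy
        rcases List.mem_append.1 hy with hy' | hy'
        · simp [hpx, h0 y hy']
        · simp [hpx, h1 y hy'])]
      rw [List.append_assoc, ih A0 (A1 ++ [x]) h0 (by
        intro y hy
        rcases List.mem_append.1 hy with hy' | hy'
        · exact h1 y hy'
        · simp only [List.mem_singleton] at hy'
          rw [hy', hpx])]
      simp [hpx, List.append_assoc]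
    · have hpx' : p x = false := by simpa using hpx
      rw [pvInsertBy_mid _ _ A0 A1
            (fun y hy => by simp [hpx', h0 y hy])
            (fun y hy => by simp [hpx', h1 y hy])]
      rw [show A0 ++ x :: A1 = (A0 ++ [x]) ++ A1 by simp,
          ih (A0 ++ [x]) A1 (by
            intro y hy
            rcases List.mem_append.1 hy with hy' | hy'
            · exact h0 y hy'
            · simp only [List.mem_singleton] at hy'
              rw [hy', hpx']) h1]
      simp [hpx', List.append_assoc]

lemma pvSortedBoolPartition {α : Type} (xs : List α) (p : α → Bool) :
    PySem.List.sorted xs p false = xs.filter (fun x => !p x) ++ xs.filter p := by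
  rw [PySem.List.sorted_eq_foldl_insertBy]
  have := pvFoldInsertPartition p xs [] [] (by simp) (by simp)
  simpa using this

-- the two-accumulator partition loop of B
lemma pvPackFold (q : Nat → Bool) (g : Nat → List Int) :
    ∀ (l : List Nat) (a b : List (List Int)),
    (l.foldl (fun acc c => if q c then (acc.1, acc.2 ++ [g c]) else (acc.1 ++ [g c], acc.2)) (a, b))
      = (a ++ (l.filter (fun c => !q c)).map g, b ++ (l.filter q).map g) := by
  intro l
  induction l with
  | nil => intro a b; simp
  | cons x t ih =>
    intro a b
    simp only [List.foldl_cons]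
    by_cases hq : q x = true
    · rw [if_pos hq]
      rw [ih a (b ++ [g x])]
      simp [hq, List.append_assoc]
    · have hq' : q x = false := by simpa using hq
      rw [if_neg (by simp [hq']), ih (a ++ [g x]) b]
      simp [hq', List.append_assoc]

-- B's intermediate objects on the deleted grid zb, named for the proofs
def pvCell (zb : List (List Int)) (r c : Nat) : Int := (zb.getD r []).getD c 0

def pvKept (zb : List (List Int)) (c : Nat) : List Int :=
  ((List.range zb.length).filter (fun r => decide (pvCell zb r c ≠ 0))).map
    (fun r => pvCell zb r c)

def pvCol (zb : List (List Int)) (c : Nat) : List Int :=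
  List.replicate (zb.length - (pvKept zb c).length) 0 ++ pvKept zb c

lemma pvAltChar (board : List (List Int)) (group : List (Int × Int)) :
    board_remove_group_alt board group =
      (let zb := group.foldl (fun b pos => board_del_color b pos) board
       (List.range zb.length).map (fun r =>
        ((((List.range (zb.headD []).length).filter
              (fun c => !(pvKept zb c).isEmpty)).map (fun c => pvCol zb c)) ++
         (((List.range (zb.headD []).length).filter
              (fun c => (pvKept zb c).isEmpty)).map (fun c => pvCol zb c))).map
          (fun col => col.getD r 0))) := by
  unfold board_remove_group_alt
  simp only [pvSetZeroEq, List.map_id']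
  rw [pvPackFold]
  simp only [pvKept, pvCol, pvCell, List.nil_append]
  rfl

lemma pvKeptNoZero (zb : List (List Int)) (c : Nat) :
    ∀ v ∈ pvKept zb c, v ≠ 0 := by
  intro v hv
  unfold pvKept at hv
  rcases List.mem_map.1 hv with ⟨r, hr, rfl⟩
  have := (List.mem_filter.1 hr).2
  simpa using this

lemma pvKeptLen (zb : List (List Int)) (c : Nat) :
    (pvKept zb c).length ≤ zb.length := by
  unfold pvKept
  calc (((List.range zb.length).filter _).map _).length
      = ((List.range zb.length).filter _).length := List.length_map _
    _ ≤ (List.range zb.length).length := List.length_filter_le _ _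
    _ = zb.length := List.length_range

lemma pvColLen (zb : List (List Int)) (c : Nat) :
    (pvCol zb c).length = zb.length := by
  unfold pvCol
  have := pvKeptLen zb c
  simp [List.length_append, List.length_replicate]
  omega

lemma pvColCount (zb : List (List Int)) (c : Nat) :
    (pvCol zb c).count 0 = zb.length - (pvKept zb c).length := by
  unfold pvCol
  rw [List.count_append, List.count_replicate_self]
  have h0 : (pvKept zb c).count 0 = 0 := by
    rw [List.count_eq_zero]
    intro hmem
    exact pvKeptNoZero zb c 0 hmem rfl
  omega

-- per-column: A's zero-left stable sort of the deleted column IS B's padded kept list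
lemma pvColSorted (zb : List (List Int)) (c : Nat) :
    PySem.List.sorted (zb.map (fun row => row.getD c 0)) (fun x => x != 0) false =
      pvCol zb c := by
  have hcol : zb.map (fun row => row.getD c 0) =
      (List.range zb.length).map (fun r => pvCell zb r c) := by
    rw [pvMapEqRange (fun row => row.getD c 0) [] zb]
    rfl
  rw [hcol, pvSortedBoolPartition]
  have hkept : ((List.range zb.length).map (fun r => pvCell zb r c)).filter
      (fun x => x != 0) = pvKept zb c := by
    rw [List.filter_map]
    unfold pvKept
    congr 1
    apply List.filter_congr
    intro r _
    simp only [Function.comp, bne]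
    cases h : (pvCell zb r c == 0) <;> simp_all
  rw [hkept]
  unfold pvCol
  congr 1
  rw [List.eq_replicate_iff]
  constructor
  · have hsplit := List.length_eq_length_filter_add
      (l := (List.range zb.length).map (fun r => pvCell zb r c)) (fun x => x != 0)
    rw [hkept] at hsplit
    simp only [List.length_map, List.length_range] at hsplit
    omega
  · intro b hb
    have := (List.mem_filter.1 hb).2
    simpa using this

-- the column-level stable sort key of A agrees with B's emptiness test (H = zb.length = |board|)
lemma pvColKey (zb : List (List Int)) (H : Nat) (c : Nat) (hlen : zb.length = H) :
    (decide ((PySem.List.count (pvCol zb c) 0 : Int) = (H : Int))) =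
      (pvKept zb c).isEmpty := by
  rw [PySem.List.count_eq, pvColCount, hlen]
  have hle := pvKeptLen zb c
  rw [hlen] at hle
  have h1 : ((H - (pvKept zb c).length : Nat) : Int) = (H : Int) ↔
      (pvKept zb c).length = 0 := by
    constructor
    · intro h; omega
    · intro h; rw [h]; simp
  rw [decide_eq_decide.2 h1]
  exact (fun l : List Int => by cases l <;> simp : ∀ l : List Int, decide (l.length = 0) = l.isEmpty) _

-- ===== VERDICT (by name: the statement is the Claim_ definition above) =====
theorem board_remove_group_spec : Claim_equal_board_remove_group := by
  intro board group hdom hpre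
  unfold Spec_board_remove_group
  obtain ⟨hrect, hw0, hrange⟩ := hpre
  rw [pvAltChar]
  by_cases hb : board = []
  · subst hb
    have hz : pyZipT [] = [] := by rw [pyZipT, dif_neg]; simp
    unfold board_remove_group
    simp only [pvFoldDel_nil, hz, List.map_nil]
    have hs : PySem.List.sorted ([] : List (List Int))
        (fun x => decide ((PySem.List.count x 0 : Int) = board_height [])) false = [] := rfl
    rw [hs, hz]
    simp
  · have hW : (board.headD []).length ≠ 0 := hw0 hb
    have hH : board.length ≠ 0 := by
      intro h; exact hb (List.length_eq_zero_iff.1 h)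
    set W := (board.headD []).length with hWdef
    set zb := group.foldl (fun b pos => board_del_color b pos) board with hzb
    have hlen : zb.length = board.length := pvFoldDel_length group board
    have hmaplen : zb.map List.length = board.map List.length := pvFoldDel_mapLen group board
    have hrows : ∀ row ∈ zb, W ≤ row.length := by
      intro row hrow
      rcases List.mem_iff_getElem.1 hrow with ⟨i, hi, rfl⟩
      have hib : i < board.length := by rw [← hlen]; exact hi
      have h1 : (zb.map List.length)[i]? = (board.map List.length)[i]? := by rw [hmaplen]
      rw [List.getElem?_map, List.getElem?_map, List.getElem?_eq_getElem hi,
          List.getElem?_eq_getElem hib] at h1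
      simp only [Option.map_some, Option.some.injEq] at h1
      rw [h1]
      exact hrect _ (List.getElem_mem hib)
    have hzbne : zb ≠ [] := by
      intro h
      rw [h] at hlen
      exact hH hlen.symm
    have hzbW : (zb.headD []).length = W := by
      rcases hzbe : zb with - | ⟨r0, t⟩
      · exact absurd hzbe hzbne
      · rcases hbe : board with - | ⟨a0, t0⟩
        · exact absurd hbe hb
        · rw [hzbe, hbe] at hmaplen
          simp only [List.map_cons, List.cons.injEq] at hmaplen
          rw [hWdef, hbe]
          simpa using hmaplen.1
    have hzbHead : ∃ row ∈ zb, row.length = W := by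
      rcases hzbe : zb with - | ⟨r0, t⟩
      · exact absurd hzbe hzbne
      · rw [← hzbe]
        exact ⟨zb.headD [], by rw [hzbe]; simp, hzbW⟩
    -- the columns of the deleted board, gravity applied, are B's columns
    have hcols : (List.range W).map (fun c =>
        PySem.List.sorted (zb.map (fun row => row.getD c 0)) (fun x => x != 0) false) =
        (List.range W).map (fun c => pvCol zb c) := by
      apply List.map_congr_left
      intro c _
      exact pvColSorted zb c
    have hkey1 : ∀ x ∈ List.range W,
        ((fun x => !(decide ((PySem.List.count x 0 : Int) = board_height board))) ∘
          (fun c => pvCol zb c)) x = !(pvKept zb x).isEmpty := by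
      intro c _
      rw [Function.comp_apply, board_height, pvColKey zb board.length c hlen]
    have hkey2 : ∀ x ∈ List.range W,
        ((fun x => decide ((PySem.List.count x 0 : Int) = board_height board)) ∘
          (fun c => pvCol zb c)) x = (pvKept zb x).isEmpty := by
      intro c _
      rw [Function.comp_apply, board_height, pvColKey zb board.length c hlen]
    unfold board_remove_group
    simp only [List.map_id', ← hzb]
    rw [pvZipT_spec W zb hzbne hrows hzbHead, List.map_map]
    simp only [Function.comp_def]
    rw [hcols, pvSortedBoolPartition, List.filter_map, List.filter_map,
        List.filter_congr hkey1, List.filter_congr hkey2]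
    have hLrows : ∀ col ∈
        (((List.range W).filter (fun c => !(pvKept zb c).isEmpty)).map (fun c => pvCol zb c)) ++
        (((List.range W).filter (fun c => (pvKept zb c).isEmpty)).map (fun c => pvCol zb c)),
        col.length = board.length := by
      intro col hcol
      rcases List.mem_append.1 hcol with h | h <;>
        · rcases List.mem_map.1 h with ⟨c, -, rfl⟩
          rw [pvColLen, hlen]
    have hLne : (((List.range W).filter (fun c => !(pvKept zb c).isEmpty)).map
            (fun c => pvCol zb c)) ++
        (((List.range W).filter (fun c => (pvKept zb c).isEmpty)).map
            (fun c => pvCol zb c)) ≠ [] := by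
      intro h
      have hsplit := List.length_eq_length_filter_add
        (l := List.range W) (fun c => (pvKept zb c).isEmpty)
      have h2 := congrArg List.length h
      simp only [List.length_append, List.length_map, List.length_nil,
        List.length_range] at h2 hsplit
      omega
    obtain ⟨col0, hcol0⟩ := List.exists_mem_of_ne_nil _ hLne
    rw [pvZipT_spec board.length _ hLne
        (fun col hc => le_of_eq (hLrows col hc).symm) ⟨col0, hcol0, hLrows col0 hcol0⟩]
    rw [hzbW, hlen]
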